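-- pv_equiv track=rewrite | github.com/Dhruvawara/learn_python | data_structures_and_algoritms/big_o/big_o.py | funChallenge
-- ===== SOURCE A (Python) =====
-- def funChallenge(data):
--     a = 10  # O(1)
--     a = 50 + 3  # O(1)
--
--     for i in range(len(data)):  # O(n)
--         anotherFunction()  # O(n)
--         stranger = True  # O(n)
--         a += 1  # O(n)
--
--     return a  # O(1)
--
-- def anotherFunction():
--     pass
-- ===== SOURCE B (Python) =====
-- def funChallenge(data):
--     return 53 + len(data)
-- ===== Notes on version B (the rewrite author's own statement) =====
-- stated objective: simpler
-- what changed: Replaced the loop that increments an accumulator once per element (starting from 53) with the closed-form 53 + len(data).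
import Mathlib
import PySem

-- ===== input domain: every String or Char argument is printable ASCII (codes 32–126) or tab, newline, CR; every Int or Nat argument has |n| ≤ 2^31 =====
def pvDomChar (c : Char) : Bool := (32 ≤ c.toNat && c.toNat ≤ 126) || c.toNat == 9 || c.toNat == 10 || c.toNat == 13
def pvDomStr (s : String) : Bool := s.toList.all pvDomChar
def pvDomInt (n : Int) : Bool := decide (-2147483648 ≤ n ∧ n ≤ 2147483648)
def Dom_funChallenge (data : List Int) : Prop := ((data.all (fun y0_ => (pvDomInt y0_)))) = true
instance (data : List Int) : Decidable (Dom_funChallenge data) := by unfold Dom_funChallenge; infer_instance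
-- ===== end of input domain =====

-- B replaces A's per-element increment loop by the closed form 53 + len(data): simpler, O(1).

-- ===== PORT A =====
-- a = 10; a = 50 + 3; for i in range(len(data)): a += 1; return a
def funChallenge (data : List Int) : Int :=
  let a : Int := 10
  let a : Int := 50 + 3
  (PySem.List.pyRange 0 (data.length : Int) 1).foldl (fun a _ => a + 1) a

-- ===== PORT B =====
def funChallenge_alt (data : List Int) : Int := 53 + (data.length : Int)

-- ===== PRECONDITION & SPEC =====
def Spec_funChallenge (data : List Int) (out : Int) : Prop := out = funChallenge_alt data
instance (data : List Int) (out : Int) : Decidable (Spec_funChallenge data out) := by unfold Spec_funChallenge; infer_instance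

-- ===== CLAIM (what is proved, stated in full; the proofs are below) =====
def Claim_equal_funChallenge : Prop := ∀ (data : List Int), Dom_funChallenge data → Spec_funChallenge data (funChallenge data)

-- ===== LEMMAS AND PROOFS =====
theorem pv_foldl_add_one (l : List Int) (a : Int) :
    l.foldl (fun a _ => a + 1) a = a + l.length := by
  induction l generalizing a with
  | nil => simp
  | cons x xs ih => simp [List.foldl, ih]; ring

-- ===== VERDICT =====
theorem funChallenge_spec : Claim_equal_funChallenge := by
  intro data _
  unfold Spec_funChallenge funChallenge funChallenge_alt
  rw [pv_foldl_add_one, PySem.List.length_pyRange_one]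
  omega
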